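-- pv_equiv track=rewrite | github.com/GuyPago/computational-thinking-with-Python | HomeWork/Ex6/ex6_206260762.py | clean_words_of_sentence
-- ===== SOURCE A (Python) =====
-- def clean_words_of_sentence(sentence):
--     wrong = ['#','$','!','?','%',',','.']
--     sentence = sentence.lower()
--     lst = sentence.split()
--     for i in range(len(lst)):
--         for j in wrong:
--             if j in lst[i]:
--                 lst[i] = lst[i].replace(j,'')
--     return lst
-- ===== SOURCE B (Python) =====
-- def clean_words_of_sentence(sentence):
--     wrong = set('#$!?%,.')
--     return [''.join(c for c in word if c not in wrong)
--             for word in sentence.lower().split()]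
-- ===== Notes on version B (the rewrite author's own statement) =====
-- stated objective: idiomatic
-- what changed: Instead of seven whole-word replace passes (one per punctuation mark) mutating the word list in place, B rebuilds each word in a single character-level pass keeping only characters outside a punctuation set, as a comprehension.
import Mathlib
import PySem

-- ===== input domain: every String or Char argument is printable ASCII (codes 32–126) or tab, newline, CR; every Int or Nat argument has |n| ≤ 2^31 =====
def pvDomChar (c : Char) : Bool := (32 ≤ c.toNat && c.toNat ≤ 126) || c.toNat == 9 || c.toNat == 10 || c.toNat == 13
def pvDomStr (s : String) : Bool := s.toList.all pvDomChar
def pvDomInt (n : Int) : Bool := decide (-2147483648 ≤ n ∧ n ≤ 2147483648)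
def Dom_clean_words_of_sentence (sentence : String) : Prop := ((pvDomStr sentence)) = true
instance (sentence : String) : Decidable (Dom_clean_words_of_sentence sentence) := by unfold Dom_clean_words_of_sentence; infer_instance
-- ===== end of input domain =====

-- B replaces A's seven per-mark whole-word replace passes by one character-level
-- filtering pass per word (idiomatic comprehension); return values are proved equal.

-- ===== PORT A =====
-- wrong = ['#','$','!','?','%',',','.']
def pvWrongA : List String := ["#", "$", "!", "?", "%", ",", "."]

-- for each word, the inner 'for j in wrong: if j in w: w = w.replace(j, "")'
def pvInnerA (w : String) : String :=
  pvWrongA.foldl (fun w j => if PySem.Str.isIn j w then PySem.Str.replace w j "" else w) w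

def clean_words_of_sentence (sentence : String) : List String :=
  (PySem.Str.split₀ (PySem.Str.lower sentence)).map pvInnerA

-- ===== PORT B =====
-- wrong = set('#$!?%,.')
def pvWrongB : List Char := ['#', '$', '!', '?', '%', ',', '.']

def clean_words_of_sentence_alt (sentence : String) : List String :=
  (PySem.Str.split₀ (PySem.Str.lower sentence)).map
    (fun w => String.ofList (w.toList.filter (fun c => !pvWrongB.contains c)))

-- ===== PRECONDITION & SPEC =====
def Spec_clean_words_of_sentence (sentence : String) (out : List String) : Prop := out = clean_words_of_sentence_alt sentence
instance (sentence : String) (out : List String) : Decidable (Spec_clean_words_of_sentence sentence out) := by unfold Spec_clean_words_of_sentence; infer_instance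

-- ===== CLAIM (what is proved, stated in full; the proofs are below) =====
def Claim_equal_clean_words_of_sentence : Prop := ∀ (sentence : String), Dom_clean_words_of_sentence sentence → Spec_clean_words_of_sentence sentence (clean_words_of_sentence sentence)

-- ===== LEMMAS AND PROOFS =====

-- replace.go with a single-char pattern and empty replacement filters that char out
lemma replace_go_single (c : Char) :
    ∀ (fuel : Nat) (l acc : List Char), l.length ≤ fuel →
      PySem.Chars.replace.go [c] [] fuel l acc
        = acc.reverse ++ l.filter (fun x => !(x == c)) := by
  intro fuel
  induction fuel with
  | zero =>
    intro l acc h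
    have : l = [] := List.length_eq_zero_iff.mp (Nat.le_zero.mp h)
    subst this; simp [PySem.Chars.replace.go]
  | succ n ih =>
    intro l acc h
    cases l with
    | nil => simp [PySem.Chars.replace.go]
    | cons x t =>
      simp only [PySem.Chars.replace.go]
      have ht : t.length ≤ n := by simpa using Nat.le_of_succ_le_succ h
      by_cases hx : x = c
      · subst hx
        rw [if_pos (by simp [List.isPrefixOf] : List.isPrefixOf [x] (x :: t) = true)]
        simp only [List.reverse_nil, List.nil_append, List.length_cons, List.length_nil,
          List.drop_succ_cons, List.drop_zero]
        rw [ih t acc ht]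
        simp
      · rw [if_neg (by simp [List.isPrefixOf, Ne.symm hx] :
          ¬ List.isPrefixOf [c] (x :: t) = true)]
        rw [ih t (x :: acc) ht]
        simp [hx]

lemma replace_single (c : Char) (s : List Char) :
    PySem.Chars.replace s [c] [] = s.filter (fun x => !(x == c)) := by
  rw [PySem.Chars.replace, if_neg (by simp : ¬ List.isEmpty [c] = true)]
  exact replace_go_single c s.length s [] (le_refl _)

-- the inner loop of A, over any list of single chars, is a membership filter
lemma foldl_replace_eq_filter (cs : List Char) :
    ∀ (w : List Char),
      cs.foldl (fun w c => if PySem.Chars.isIn [c] w then PySem.Chars.replace w [c] [] else w) w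
        = w.filter (fun x => !cs.contains x) := by
  induction cs with
  | nil => intro w; simp
  | cons c cs ih =>
    intro w
    have hstep :
        (if PySem.Chars.isIn [c] w then PySem.Chars.replace w [c] [] else w)
          = w.filter (fun x => !(x == c)) := by
      by_cases h : PySem.Chars.isIn [c] w = true
      · simp [h, replace_single]
      · have hni : c ∉ w := by
          intro hc
          obtain ⟨l1, l2, hl⟩ := List.append_of_mem hc
          exact h ((PySem.Chars.isIn_iff_infix _ _).mpr ⟨l1, l2, by simp [hl]⟩)
        rw [if_neg h]
        symm
        apply List.filter_eq_self.mpr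
        intro x hx
        simp only [Bool.not_eq_eq_eq_not, Bool.not_true, beq_eq_false_iff_ne, ne_eq]
        rintro rfl; exact hni hx
    rw [List.foldl_cons, hstep, ih, List.filter_filter]
    apply List.filter_congr
    intro x _
    simp [beq_eq_decide, Bool.and_comm]

-- the string-level fold of A computes the Chars-level fold on .toList
lemma foldl_toList (js : List Char) :
    ∀ (w : String),
      ((js.map (fun c => String.ofList [c])).foldl
          (fun w j => if PySem.Str.isIn j w then PySem.Str.replace w j "" else w) w).toList
        = js.foldl (fun w c => if PySem.Chars.isIn [c] w then PySem.Chars.replace w [c] [] else w) w.toList := by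
  induction js with
  | nil => intro w; simp
  | cons c cs ih =>
    intro w
    rw [List.map_cons, List.foldl_cons, List.foldl_cons, ih]
    congr 1
    by_cases h : PySem.Chars.isIn [c] w.toList = true
    · rw [if_pos (by simpa using h), if_pos h]
      simp [PySem.Str.replace]
    · rw [if_neg (by simpa using h), if_neg h]

lemma inner_eq (w : String) :
    pvInnerA w = String.ofList (w.toList.filter (fun c => !pvWrongB.contains c)) := by
  apply String.ext  -- strings are equal iff their char lists are
  rw [String.toList_ofList]
  have h := foldl_replace_eq_filter pvWrongB w.toList
  -- rewrite A's string-level fold to the Chars-level fold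
  have hmap : pvWrongA = pvWrongB.map (fun c => String.ofList [c]) := by rfl
  rw [pvInnerA, hmap, foldl_toList, h]

-- ===== VERDICT (by name: the statement is the Claim_ definition above) =====
theorem clean_words_of_sentence_spec : Claim_equal_clean_words_of_sentence := by
  intro sentence _
  unfold Spec_clean_words_of_sentence clean_words_of_sentence clean_words_of_sentence_alt
  exact List.map_congr_left (fun w _ => inner_eq w)
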